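-- pv_equiv track=rewrite | github.com/miliar/Code_Jam_Webscraper | Solutions_python/Problem_155/1248.py | process_people
-- ===== SOURCE A (Python) =====
-- def process_people(people):
--     standing = 0
--     min_people_needed = 0
--     for s_i, num_people in enumerate(people):
--         num_people = int(num_people)
--         if num_people == 0:
--             continue
--         elif s_i == standing:
--             standing += num_people
--         else:
--             diff = s_i - standing
--             standing += num_people
--             if diff > min_people_needed:
--                 min_people_needed = diff
--
--     return min_people_needed
-- ===== SOURCE B (Python) =====
-- def process_people(people):
--     ints = [int(p) for p in people]
--     prefix = [0]
--     for p in ints: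
--         prefix.append(prefix[-1] + p)
--     return max([0] + [i - pre for i, (p, pre) in enumerate(zip(ints, prefix)) if p != 0])
-- ===== Notes on version B (the rewrite author's own statement) =====
-- stated objective: alternative
-- what changed: Replaces A's single branching accumulator loop (standing/min_people_needed state machine) by a precomputed prefix-sum table followed by one max-reduction over the nonzero positions.
import Mathlib
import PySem

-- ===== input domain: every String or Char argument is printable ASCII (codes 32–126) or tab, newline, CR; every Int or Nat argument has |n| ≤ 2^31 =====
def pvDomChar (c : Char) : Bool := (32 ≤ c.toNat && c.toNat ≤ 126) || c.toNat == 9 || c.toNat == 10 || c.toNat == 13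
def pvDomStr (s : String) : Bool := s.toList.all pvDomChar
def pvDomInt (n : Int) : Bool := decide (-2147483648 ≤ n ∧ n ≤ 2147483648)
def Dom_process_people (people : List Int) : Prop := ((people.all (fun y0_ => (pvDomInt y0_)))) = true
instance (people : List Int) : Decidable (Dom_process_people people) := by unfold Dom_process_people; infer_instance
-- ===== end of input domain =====

-- B replaces A's branching accumulator state machine by a prefix-sum table plus one max-reduction over nonzero positions (alternative decomposition, same cost).

-- ===== PORT A =====
def process_people (people : List Int) : Int :=
  ((PySem.List.enumerate people).foldl
    (fun (st : Int × Int) (pr : Int × Int) =>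
      -- st = (standing, min_people_needed); pr = (s_i, num_people); int(num_people) is the identity on int
      if pr.2 = 0 then st
      else if pr.1 = st.1 then (st.1 + pr.2, st.2)
      else
        let diff := pr.1 - st.1
        (st.1 + pr.2, if diff > st.2 then diff else st.2))
    (0, 0)).2

-- ===== PORT B =====
def process_people_alt (people : List Int) : Int :=
  let ints := people.map (fun p => p)  -- int(p) is the identity on int
  let pref := ints.foldl (fun a p => a ++ [PySem.List.pyGetD a (-1) 0 + p]) [(0 : Int)]
  let cands := ((PySem.List.enumerate (ints.zip pref)).filter (fun pr => pr.2.1 != 0)).map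
      (fun pr => pr.1 - pr.2.2)
  (PySem.List.max? ((0 : Int) :: cands) (fun x => x)).getD 0

-- ===== PRECONDITION & SPEC =====
def Spec_process_people (people : List Int) (out : Int) : Prop := out = process_people_alt people
instance (people : List Int) (out : Int) : Decidable (Spec_process_people people out) := by unfold Spec_process_people; infer_instance

-- ===== CLAIM (what is proved, stated in full; the proofs are below) =====
def Claim_equal_process_people : Prop := ∀ (people : List Int), Dom_process_people people → Spec_process_people people (process_people people)

-- ===== LEMMAS AND PROOFS =====

/-- running sums of `xs` starting after total `t` -/
def pvSums : Int → List Int → List Int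
  | _, [] => []
  | t, p :: r => (t + p) :: pvSums (t + p) r

/-- the `i - prefix_before_i` candidates of the nonzero positions, index starting at `s`,
    prefix total so far `c` -/
def pvCand : List Int → Int → Int → List Int
  | [], _, _ => []
  | p :: t, i, c => if p = 0 then pvCand t (i + 1) c else (i - c) :: pvCand t (i + 1) (c + p)

lemma build_prefix (xs : List Int) : ∀ (acc : List Int) (c : Int), acc.getLast? = some c →
    xs.foldl (fun a p => a ++ [PySem.List.pyGetD a (-1) 0 + p]) acc = acc ++ pvSums c xs := by
  induction xs with
  | nil => intro acc c _; simp [pvSums]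
  | cons p t ih =>
    intro acc c hc
    have hne : acc ≠ [] := by rintro rfl; simp at hc
    have hlast : PySem.List.pyGetD acc (-1) 0 = c := by
      rw [PySem.List.pyGetD_neg_one acc 0 hne]
      have := List.getLast?_eq_some_getLast (l := acc) hne
      rw [this] at hc
      exact (Option.some.inj hc)
    simp only [List.foldl_cons, hlast]
    rw [ih (acc ++ [c + p]) (c + p) (by simp)]
    simp [pvSums]

lemma cand_eq (xs : List Int) : ∀ (s c : Int),
    (((PySem.List.enumerate (xs.zip (c :: pvSums c xs)) s).filter
        (fun pr => pr.2.1 != 0)).map (fun pr => pr.1 - pr.2.2)) = pvCand xs s c := by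
  induction xs with
  | nil => intro s c; simp [PySem.List.enumerate_nil, pvCand]
  | cons p t ih =>
    intro s c
    by_cases hp : p = 0
    · subst hp
      simp only [pvSums, List.zip_cons_cons, PySem.List.enumerate_cons, List.filter_cons,
        add_zero, pvCand]
      simp only [show ((0 : Int) != 0) = false by decide, Bool.false_eq_true, if_false]
      exact ih (s + 1) c
    · simp only [pvSums, List.zip_cons_cons, PySem.List.enumerate_cons, List.filter_cons]
      simp only [show (p != 0) = true by simpa using hp, if_true, List.map_cons]
      rw [pvCand, if_neg hp]
      exact congrArg (fun l => (s - c) :: l) (ih (s + 1) (c + p))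

lemma loopA (xs : List Int) : ∀ (s st m : Int), 0 ≤ m →
    (PySem.List.enumerate xs s).foldl
      (fun (st : Int × Int) (pr : Int × Int) =>
        if pr.2 = 0 then st
        else if pr.1 = st.1 then (st.1 + pr.2, st.2)
        else
          let diff := pr.1 - st.1
          (st.1 + pr.2, if diff > st.2 then diff else st.2))
      (st, m)
    = (st + xs.sum, (pvCand xs s st).foldl max m) := by
  induction xs with
  | nil => intro s st m _; simp [PySem.List.enumerate_nil, pvCand]
  | cons p t ih =>
    intro s st m hm
    rw [PySem.List.enumerate_cons, List.foldl_cons]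
    show List.foldl _
      (if p = 0 then (st, m)
       else if s = st then (st + p, m)
       else (st + p, if s - st > m then s - st else m)) _ = _
    by_cases hp : p = 0
    · rw [if_pos hp, ih (s + 1) st m hm, pvCand, if_pos hp]
      subst hp; simp
    · have hstep :
        (if p = 0 then ((st : Int), (m : Int))
         else if s = st then (st + p, m)
         else (st + p, if s - st > m then s - st else m))
          = ((st + p : Int), max m (s - st)) := by
        rw [if_neg hp]
        by_cases hs : s = st
        · rw [if_pos hs, hs]; simp [max_eq_left hm]
        · rw [if_neg hs]
          congr 1
          by_cases hgt : s - st > m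
          · rw [if_pos hgt, max_eq_right (le_of_lt hgt)]
          · rw [if_neg hgt, max_eq_left (by omega)]
      rw [hstep, ih (s + 1) (st + p) (max m (s - st)) (le_trans hm (le_max_left _ _)),
        pvCand, if_neg hp]
      simp [add_assoc, add_comm, add_left_comm]

lemma alt_eq (people : List Int) :
    process_people_alt people = (pvCand people 0 0).foldl max 0 := by
  unfold process_people_alt
  simp only [List.map_id_fun', id]
  rw [build_prefix people [(0 : Int)] 0 (by simp), List.singleton_append, cand_eq people 0 0,
    PySem.List.max?_id_cons]
  rfl

-- ===== VERDICT (by name: the statement is the Claim_ definition above) =====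
theorem process_people_spec : Claim_equal_process_people := by
  intro people _
  show process_people people = process_people_alt people
  rw [alt_eq]
  unfold process_people
  rw [loopA people 0 0 0 le_rfl]
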